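-- pv_equiv track=rewrite | github.com/ItZoopark/firstProject11a | main.py | calcTargetSum
-- ===== SOURCE A (Python) =====
-- def calcTargetSum(a, target):
--     count = 0
--     for i in range(0, len(a)):
--         for j in range(i + 1, len(a)):
--             count += 1
--             if a[i] + a[j] == target:
--                 return count
--
--     return count
-- ===== SOURCE B (Python) =====
-- def calcTargetSum(a, target):
--     # O(n): last-occurrence index per value, first matching row found by one scan,
--     # count of pair checks recovered by closed form.
--     n = len(a)
--     last = {}
--     for idx, v in enumerate(a):
--         last[v] = idx
--     for i, x in enumerate(a):
--         if last.get(target - x, -1) > i: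
--             j = a[i + 1:].index(target - x)
--             return i * (n - 1) - i * (i - 1) // 2 + j + 1
--     return n * (n - 1) // 2
-- ===== Notes on version B (the rewrite author's own statement) =====
-- stated objective: faster
-- what changed: Replaces the O(n^2) nested pair scan with a single-pass last-occurrence dictionary that finds the first matching row in O(n) and recovers the number of pair checks by a closed-form triangular count.
import Mathlib
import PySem

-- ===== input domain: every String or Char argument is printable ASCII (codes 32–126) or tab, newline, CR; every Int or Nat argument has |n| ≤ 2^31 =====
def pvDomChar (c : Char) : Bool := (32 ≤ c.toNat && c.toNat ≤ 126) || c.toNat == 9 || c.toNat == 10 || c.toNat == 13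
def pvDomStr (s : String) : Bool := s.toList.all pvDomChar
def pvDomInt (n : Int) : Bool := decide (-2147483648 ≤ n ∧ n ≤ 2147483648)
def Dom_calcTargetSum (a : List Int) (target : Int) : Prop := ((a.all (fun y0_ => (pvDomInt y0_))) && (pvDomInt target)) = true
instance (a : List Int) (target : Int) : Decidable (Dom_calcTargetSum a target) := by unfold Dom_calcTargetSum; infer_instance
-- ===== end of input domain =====

-- B replaces A's nested pair scan (count incremented per check, early return on the first
-- matching pair) by a last-occurrence dictionary plus a closed-form triangular count.

-- ===== PORT A =====
-- inner 'for j' loop over the elements after a[i]: count += 1 per element, early exit on match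
def aInner (target x : Int) : List Int → Int → Int × Bool
  | [], count => (count, false)
  | y :: rest, count =>
    if x + y == target then (count + 1, true) else aInner target x rest (count + 1)

-- outer 'for i' loop: iterate over tails, propagate the running count, stop when inner found
def aOuter (target : Int) : List Int → Int → Int
  | [], count => count
  | x :: rest, count =>
    match aInner target x rest count with
    | (c, true) => c
    | (c, false) => aOuter target rest c

def calcTargetSum (a : List Int) (target : Int) : Int := aOuter target a 0

-- ===== PORT B =====
-- last[v] = idx  for idx, v in enumerate(a)
def bLast (a : List Int) : PySem.Dict Int Int :=
  (PySem.List.enumerate a 0).foldl (fun d p => d.insert p.2 p.1) PySem.Dict.empty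

-- for i, x in enumerate(a): if last.get(target-x, -1) > i: return closed-form count
def bLoop (a : List Int) (target n : Int) (last : PySem.Dict Int Int) : List (Int × Int) → Int
  | [] => PySem.Int.floordiv (n * (n - 1)) 2
  | (i, x) :: rest =>
    if last.getD (target - x) (-1) > i then
      -- a[i+1:].index(target-x): the guard guarantees the value is present, so Python's
      -- .index returns (never raises); getD 0 is unreachable
      let j : Int := ((PySem.List.index? (PySem.List.slice a (some (i + 1)) none) (target - x)).getD 0 : Nat)
      i * (n - 1) - PySem.Int.floordiv (i * (i - 1)) 2 + j + 1
    else bLoop a target n last rest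

def calcTargetSum_alt (a : List Int) (target : Int) : Int :=
  bLoop a target (a.length : Int) (bLast a) (PySem.List.enumerate a 0)

-- ===== PRECONDITION & SPEC =====
def Spec_calcTargetSum (a : List Int) (target : Int) (out : Int) : Prop := out = calcTargetSum_alt a target
instance (a : List Int) (target : Int) (out : Int) : Decidable (Spec_calcTargetSum a target out) := by unfold Spec_calcTargetSum; infer_instance

-- ===== CLAIM (what is proved, stated in full; the proofs are below) =====
def Claim_equal_calcTargetSum : Prop := ∀ (a : List Int) (target : Int), Dom_calcTargetSum a target → Spec_calcTargetSum a target (calcTargetSum a target)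

-- ===== LEMMAS AND PROOFS =====

-- reference count: for each row, the number of checks it contributes
def gCount (t : Int) : List Int → Int
  | [] => 0
  | x :: rest =>
    match PySem.List.index? rest (t - x) with
    | some k => (k : Int) + 1
    | none => (rest.length : Int) + gCount t rest

lemma aInner_eq (t x : Int) (l : List Int) (c : Int) :
    aInner t x l c =
      match PySem.List.index? l (t - x) with
      | some k => (c + (k : Int) + 1, true)
      | none => (c + (l.length : Int), false) := by
  induction l generalizing c with
  | nil => simp [aInner, PySem.List.index?]
  | cons y rest ih =>
    rw [aInner]
    by_cases hy : y = t - x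
    · rw [if_pos (by simp only [beq_iff_eq]; omega), hy, PySem.List.index?_cons_self]
      simp
    · rw [if_neg (by simp only [beq_iff_eq]; omega), ih,
        PySem.List.index?_cons_of_ne rest hy]
      cases hidx : PySem.List.index? rest (t - x) with
      | none => simp; omega
      | some k => simp; omega

lemma aOuter_eq (t : Int) (l : List Int) (c : Int) :
    aOuter t l c = c + gCount t l := by
  induction l generalizing c with
  | nil => simp [aOuter, gCount]
  | cons x rest ih =>
    rw [aOuter, aInner_eq]
    cases hidx : PySem.List.index? rest (t - x) with
    | some k => simp only [gCount, hidx]; omega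
    | none => simp only [gCount, hidx, ih]; omega

-- the value bLast's fold leaves under key v, threaded as a running "last index so far"
def lastD (v : Int) : List Int → Int → Int → Int
  | [], _, dflt => dflt
  | x :: rest, s, dflt => lastD v rest (s + 1) (if v = x then s else dflt)

lemma bLast_fold (l : List Int) (s : Int) (d : PySem.Dict Int Int) (v : Int) :
    ((PySem.List.enumerate l s).foldl (fun d p => d.insert p.2 p.1) d).getD v (-1)
      = lastD v l s (d.getD v (-1)) := by
  induction l generalizing s d with
  | nil => simp [PySem.List.enumerate_nil, lastD]
  | cons x rest ih =>
    rw [PySem.List.enumerate_cons]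
    simp only [List.foldl_cons]
    rw [ih, lastD, PySem.Dict.getD_insert]

lemma lastD_gt (v : Int) (l : List Int) (s dflt i : Int) (hds : dflt < s) :
    i < lastD v l s dflt ↔
      (i < dflt ∨ ∃ k : Nat, ∃ hk : k < l.length, i < s + (k : Int) ∧ l[k] = v) := by
  induction l generalizing s dflt with
  | nil => simp [lastD]
  | cons x rest ih =>
    rw [lastD, ih _ _ (by split <;> omega)]
    constructor
    · rintro (h | ⟨k, hk, hik, hkv⟩)
      · by_cases hvx : v = x
        · rw [if_pos hvx] at h
          exact Or.inr ⟨0, by simp, by simpa using h, by simpa using hvx.symm⟩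
        · rw [if_neg hvx] at h
          exact Or.inl h
      · exact Or.inr ⟨k + 1, by simpa using hk, by push_cast; omega, by simpa using hkv⟩
    · rintro (h | ⟨k, hk, hik, hkv⟩)
      · left; split <;> omega
      · cases k with
        | zero =>
          left
          have : v = x := by simpa using hkv.symm
          rw [if_pos this]
          simpa using hik
        | succ k' =>
          right
          exact ⟨k', by simpa using hk, by push_cast at hik ⊢; omega, by simpa using hkv⟩

lemma mem_drop_iff (a : List Int) (m : Nat) (v : Int) :
    v ∈ a.drop m ↔ ∃ k : Nat, ∃ hk : k < a.length, m ≤ k ∧ a[k] = v := by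
  constructor
  · intro h
    obtain ⟨j, hj, hjv⟩ := List.mem_iff_getElem.mp h
    have hjlen : m + j < a.length := by
      have := hj; simp [List.length_drop] at this; omega
    refine ⟨m + j, hjlen, by omega, ?_⟩
    rw [← hjv, List.getElem_drop]
  · rintro ⟨k, hk, hmk, hkv⟩
    apply List.mem_iff_getElem.mpr
    refine ⟨k - m, by simp [List.length_drop]; omega, ?_⟩
    rw [List.getElem_drop]
    rw [← hkv]
    congr 1
    omega

-- B's guard, at row m, tests exactly "target - a[m] occurs after position m"
lemma guard_iff (a : List Int) (v : Int) (m : Nat) :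
    (bLast a).getD v (-1) > (m : Int) ↔ v ∈ a.drop (m + 1) := by
  unfold bLast
  rw [bLast_fold]
  have hd : (PySem.Dict.empty : PySem.Dict Int Int).getD v (-1) = -1 := by rfl
  rw [hd, gt_iff_lt, lastD_gt _ _ _ _ _ (by norm_num), mem_drop_iff]
  constructor
  · rintro (h | ⟨k, hk, hik, hkv⟩)
    · omega
    · exact ⟨k, hk, by omega, hkv⟩
  · rintro ⟨k, hk, hmk, hkv⟩
    exact Or.inr ⟨k, hk, by omega, hkv⟩

lemma two_dvd_mul_pred (m : Int) : 2 ∣ m * (m - 1) := by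
  have h : Even ((m - 1) * (m - 1 + 1)) := Int.even_mul_succ_self (m - 1)
  have h2 : m * (m - 1) = (m - 1) * (m - 1 + 1) := by ring
  rw [h2]
  exact h.two_dvd

lemma floordiv_pred_succ (m : Int) :
    PySem.Int.floordiv ((m + 1) * m) 2 = PySem.Int.floordiv (m * (m - 1)) 2 + m := by
  rw [PySem.Int.floordiv_eq_ediv_of_pos (by omega), PySem.Int.floordiv_eq_ediv_of_pos (by omega)]
  obtain ⟨q, hq⟩ := two_dvd_mul_pred (m + 1)
  obtain ⟨q', hq'⟩ := two_dvd_mul_pred m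
  have h1 : (m + 1) * m = 2 * q := by rw [← hq]; ring
  have h3 : (m + 1) * m = m * (m - 1) + 2 * m := by ring
  rw [h1, hq', Int.mul_ediv_cancel_left _ (by norm_num), Int.mul_ediv_cancel_left _ (by norm_num)]
  linarith [h1, hq', h3]

lemma drop_succ_of_drop_cons {a rest : List Int} {x : Int} {m : Nat}
    (h : a.drop m = x :: rest) : a.drop (m + 1) = rest := by
  have h1 : a.drop (m + 1) = (a.drop m).drop 1 := by rw [List.drop_drop]
  rw [h1, h, List.drop_one, List.tail_cons]

-- MAIN: bLoop on the enumerated suffix starting at row m equals the closed-form count of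
-- the first m full rows plus gCount of the suffix
lemma bLoop_eq (a : List Int) (t : Int) (l : List Int) (m : Nat)
    (hm : a.drop m = l) (hle : m ≤ a.length) :
    bLoop a t (a.length : Int) (bLast a) (PySem.List.enumerate l (m : Int))
      = (m : Int) * ((a.length : Int) - 1) - PySem.Int.floordiv ((m : Int) * ((m : Int) - 1)) 2
        + gCount t l := by
  induction l generalizing m with
  | nil =>
    have hmn : m = a.length := by
      have h := congrArg List.length hm
      simp only [List.length_drop, List.length_nil] at h
      omega
    rw [PySem.List.enumerate_nil, bLoop]
    simp only [gCount, hmn]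
    obtain ⟨q, hq⟩ := two_dvd_mul_pred ((a.length : Int))
    rw [PySem.Int.floordiv_eq_ediv_of_pos (by omega), hq,
      Int.mul_ediv_cancel_left _ (by norm_num)]
    linarith [hq]
  | cons x rest ih =>
    have hrest : a.drop (m + 1) = rest := drop_succ_of_drop_cons hm
    have hmlt : m < a.length := by
      by_contra h
      rw [List.drop_eq_nil_of_le (by omega)] at hm
      simp at hm
    rw [PySem.List.enumerate_cons, bLoop]
    by_cases hg : (bLast a).getD (t - x) (-1) > (m : Int)
    · rw [if_pos hg]
      have hmem : (t - x) ∈ rest := by rw [← hrest]; exact (guard_iff a (t - x) m).mp hg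
      obtain ⟨k, hk⟩ := Option.isSome_iff_exists.mp
        ((PySem.List.index?_isSome_iff rest (t - x)).mpr hmem)
      have hslice : PySem.List.slice a (some ((m : Int) + 1)) none = rest := by
        rw [show ((m : Int) + 1) = ((m + 1 : Nat) : Int) from by push_cast; ring,
          PySem.List.slice_from_natCast, hrest]
      rw [hslice, hk]
      simp only [gCount, hk, Option.getD_some]
      ring
    · rw [if_neg hg]
      have hnmem : (t - x) ∉ rest := fun hmem =>
        hg ((guard_iff a (t - x) m).mpr (by rw [hrest]; exact hmem))
      have hidx : PySem.List.index? rest (t - x) = none :=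
        (PySem.List.index?_eq_none_iff rest (t - x)).mpr hnmem
      rw [show ((m : Int) + 1) = ((m + 1 : Nat) : Int) from by push_cast; ring,
        ih (m + 1) hrest (by omega)]
      simp only [gCount, hidx]
      have hrl : (rest.length : Int) = (a.length : Int) - (m : Int) - 1 := by
        have h := congrArg List.length hm
        simp only [List.length_drop, List.length_cons] at h
        omega
      have e2 := floordiv_pred_succ ((m : Int))
      have e4 : PySem.Int.floordiv (((m : Int) + 1) * (((m : Int) + 1) - 1)) 2
          = PySem.Int.floordiv (((m : Int) + 1) * (m : Int)) 2 := by
        rw [show ((m : Int) + 1) * (((m : Int) + 1) - 1) = ((m : Int) + 1) * (m : Int) from by ring]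
      have e1 : ((m : Int) + 1) * ((a.length : Int) - 1)
          = (m : Int) * ((a.length : Int) - 1) + ((a.length : Int) - 1) := by ring
      push_cast
      rw [e4]
      linarith [e1, e2, hrl]

-- ===== VERDICT (by name: the statement is the Claim_ definition above) =====
theorem calcTargetSum_spec : Claim_equal_calcTargetSum := by
  intro a t _
  show calcTargetSum a t = calcTargetSum_alt a t
  rw [calcTargetSum, aOuter_eq, calcTargetSum_alt]
  have := bLoop_eq a t a 0 (by simp) (by omega)
  simp only [Nat.cast_zero] at this
  rw [this]
  have h0 : PySem.Int.floordiv (0 * (0 - 1)) 2 = 0 := by decide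
  rw [h0]
  ring
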